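-- pv_equiv track=rewrite | github.com/samspillers/advent2023 | code/d2/p2.py | verify_line
-- ===== SOURCE A (Python) =====
-- def verify_line(parsed_line):
--     min_r = 0
--     min_g = 0
--     min_b = 0
--     _, pulls = parsed_line
--     for pull in pulls:
--         r, g, b = pull
--         if r is not None and r > min_r:
--             min_r = r
--         if g is not None and g > min_g:
--             min_g = g
--         if b is not None and b > min_b:
--             min_b = b
--     return min_r * min_g * min_b
-- ===== SOURCE B (Python) =====
-- def verify_line(parsed_line):
--     _, pulls = parsed_line
--     rs = sorted(r for r, _g, _b in pulls if r is not None)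
--     gs = sorted(g for _r, g, _b in pulls if g is not None)
--     bs = sorted(b for _r, _g, b in pulls if b is not None)
--     mr = max(0, rs[-1]) if rs else 0
--     mg = max(0, gs[-1]) if gs else 0
--     mb = max(0, bs[-1]) if bs else 0
--     return mr * mg * mb
-- ===== Notes on version B (the rewrite author's own statement) =====
-- stated objective: alternative
-- what changed: Replaces the single loop carrying three mutable running maxima by sorting each channel's present values and taking the last (largest) element, clamped at 0, then multiplying the three.
import Mathlib
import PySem

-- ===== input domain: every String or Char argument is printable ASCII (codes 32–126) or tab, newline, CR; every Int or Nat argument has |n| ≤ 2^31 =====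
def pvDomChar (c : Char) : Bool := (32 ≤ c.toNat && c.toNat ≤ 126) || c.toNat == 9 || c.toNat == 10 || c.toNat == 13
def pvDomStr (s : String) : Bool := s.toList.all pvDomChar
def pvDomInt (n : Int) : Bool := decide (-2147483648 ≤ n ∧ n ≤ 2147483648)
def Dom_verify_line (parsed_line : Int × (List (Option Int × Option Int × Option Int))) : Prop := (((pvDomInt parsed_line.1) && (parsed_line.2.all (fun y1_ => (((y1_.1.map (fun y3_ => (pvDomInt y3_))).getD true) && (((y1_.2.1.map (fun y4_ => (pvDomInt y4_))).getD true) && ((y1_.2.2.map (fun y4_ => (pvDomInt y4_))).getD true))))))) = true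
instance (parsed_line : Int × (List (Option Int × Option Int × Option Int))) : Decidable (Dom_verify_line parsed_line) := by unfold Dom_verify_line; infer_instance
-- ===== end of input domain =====

-- B replaces A's single three-accumulator loop by sorting each channel's present values and taking the last element, clamped at 0 (objective: alternative algorithm, not faster).
-- ===== PORT A =====
-- one loop updating three running maxima, then the product
def verify_line (parsed_line : Int × (List (Option Int × Option Int × Option Int))) : Int :=
  let pulls := parsed_line.2
  let st := pulls.foldl (fun (s : Int × Int × Int) pull =>
    let mr := match pull.1 with
      | some r => if r > s.1 then r else s.1
      | none => s.1
    let mg := match pull.2.1 with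
      | some g => if g > s.2.1 then g else s.2.1
      | none => s.2.1
    let mb := match pull.2.2 with
      | some b => if b > s.2.2 then b else s.2.2
      | none => s.2.2
    (mr, mg, mb)) (0, 0, 0)
  st.1 * st.2.1 * st.2.2

-- ===== PORT B =====
-- B: sort the present values of one channel ascending; the channel's answer is the last (largest) element clamped at 0, or 0 if empty
def pvChanMax (vals : List Int) : Int :=
  let s := PySem.List.sorted vals (fun x => x) false
  match s.getLast? with
  | some v => max 0 v
  | none => 0

def verify_line_alt (parsed_line : Int × (List (Option Int × Option Int × Option Int))) : Int :=
  let pulls := parsed_line.2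
  let mr := pvChanMax (pulls.filterMap (fun t => t.1))
  let mg := pvChanMax (pulls.filterMap (fun t => t.2.1))
  let mb := pvChanMax (pulls.filterMap (fun t => t.2.2))
  mr * mg * mb

-- ===== PRECONDITION & SPEC =====
def Spec_verify_line (parsed_line : Int × (List (Option Int × Option Int × Option Int))) (out : Int) : Prop := out = verify_line_alt parsed_line
instance (parsed_line : Int × (List (Option Int × Option Int × Option Int))) (out : Int) : Decidable (Spec_verify_line parsed_line out) := by unfold Spec_verify_line; infer_instance

-- ===== CLAIM =====
def Claim_equal_verify_line : Prop := ∀ (parsed_line : Int × (List (Option Int × Option Int × Option Int))), Dom_verify_line parsed_line → Spec_verify_line parsed_line (verify_line parsed_line)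

-- ===== LEMMAS AND PROOFS =====
theorem if_gt_eq_max (s v : Int) : (if v > s then v else s) = max s v := by
  rw [max_def]; split_ifs <;> omega

-- each component of A's fold state equals the max-fold over that channel's present values
theorem chan_fold (pulls : List (Option Int × Option Int × Option Int)) (s : Int × Int × Int) :
    pulls.foldl (fun (s : Int × Int × Int) pull =>
      let mr := match pull.1 with
        | some r => if r > s.1 then r else s.1
        | none => s.1
      let mg := match pull.2.1 with
        | some g => if g > s.2.1 then g else s.2.1
        | none => s.2.1
      let mb := match pull.2.2 with
        | some b => if b > s.2.2 then b else s.2.2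
        | none => s.2.2
      (mr, mg, mb)) s
    = ((pulls.filterMap (fun t => t.1)).foldl max s.1,
       (pulls.filterMap (fun t => t.2.1)).foldl max s.2.1,
       (pulls.filterMap (fun t => t.2.2)).foldl max s.2.2) := by
  induction pulls generalizing s with
  | nil => simp
  | cons p ps ih =>
    obtain ⟨r, g, b⟩ := p
    rw [List.foldl_cons, ih]
    cases r <;> cases g <;> cases b <;> simp [if_gt_eq_max]

-- a max-fold over a ≤-sorted list reaches its last element
theorem foldl_max_sorted (s : List Int) (hs : s.Pairwise (· ≤ ·)) (a : Int) :
    s.foldl max a = max a (s.getLast?.getD a) := by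
  induction s generalizing a with
  | nil => simp
  | cons x xs ih =>
    have hxs : xs.Pairwise (· ≤ ·) := (List.pairwise_cons.mp hs).2
    have hle : ∀ y ∈ xs, x ≤ y := (List.pairwise_cons.mp hs).1
    rw [List.foldl_cons, ih hxs]
    cases hL : xs.getLast? with
    | none => simp_all
    | some v =>
      have hv : v ∈ xs := List.mem_of_getLast? hL
      have : x ≤ v := hle v hv
      have hL' : (x :: xs).getLast? = some v := by
        cases xs with
        | nil => simp at hL
        | cons z zs => rw [List.getLast?_cons_cons]; exact hL
      rw [hL']
      simp only [Option.getD_some]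
      omega

-- a max-fold is invariant under permutation
theorem foldl_max_perm (l₁ l₂ : List Int) (h : l₁.Perm l₂) (a : Int) :
    l₁.foldl max a = l₂.foldl max a := by
  exact h.foldl_eq a

theorem foldl_max_eq_chanMax (l : List Int) : l.foldl max 0 = pvChanMax l := by
  unfold pvChanMax
  have hperm := PySem.List.sorted_perm l (fun x => x) false
  have hpair : (PySem.List.sorted l (fun x => x) false).Pairwise (· ≤ ·) := by
    simpa using PySem.List.sorted_pairwise (xs := l) (key := fun x => x)
  rw [foldl_max_perm l _ hperm.symm 0, foldl_max_sorted _ hpair 0]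
  cases h : (PySem.List.sorted l (fun x => x) false).getLast? <;> simp [h]

-- ===== VERDICT =====
theorem verify_line_spec : Claim_equal_verify_line := by
  intro parsed_line _
  show verify_line parsed_line = verify_line_alt parsed_line
  simp only [verify_line, verify_line_alt]
  rw [chan_fold]
  simp [foldl_max_eq_chanMax]
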